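-- pv_equiv track=rewrite | github.com/MrBrantCode/unitest_baseline | mut_generate/mist_train_cf/cf_20351/solution.py | sum_unique_integers
-- ===== SOURCE A (Python) =====
-- def sum_unique_integers(lst):
--     unique_integers = set()
--     total_sum = 0
--
--     for num in lst:
--         if num not in unique_integers:
--             unique_integers.add(num)
--             total_sum += num
--
--     return total_sum
-- ===== SOURCE B (Python) =====
-- def sum_unique_integers(lst):
--     total = 0
--     prev = None
--     for x in sorted(lst):
--         if x != prev:
--             total += x
--             prev = x
--     return total
-- ===== Notes on version B (the rewrite author's own statement) =====
-- stated objective: alternative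
-- what changed: Replaces A's hash-set membership pass by a sort-based algorithm: sort the list, then scan it once adding each value when it differs from its predecessor (valid because integer addition is commutative, so the distinct-sum is order-independent).
import Mathlib
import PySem

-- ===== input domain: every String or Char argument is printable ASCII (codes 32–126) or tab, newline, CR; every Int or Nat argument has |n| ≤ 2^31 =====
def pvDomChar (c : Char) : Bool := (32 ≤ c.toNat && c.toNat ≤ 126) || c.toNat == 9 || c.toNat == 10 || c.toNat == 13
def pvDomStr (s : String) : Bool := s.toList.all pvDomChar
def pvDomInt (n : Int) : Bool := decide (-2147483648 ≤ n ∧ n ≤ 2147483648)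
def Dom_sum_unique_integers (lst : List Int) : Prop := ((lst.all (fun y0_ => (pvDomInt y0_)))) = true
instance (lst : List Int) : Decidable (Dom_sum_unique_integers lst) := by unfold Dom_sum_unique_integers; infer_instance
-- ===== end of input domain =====

-- B is a sort-based algorithm: sort the list, then one adjacent-difference scan
-- adds each value once — objective: alternative (comparison sort, no seen-set).
-- Correct because integer addition is commutative: the distinct-sum is order-independent.

-- ===== PORT A =====
-- A's loop body: skip a seen num, otherwise add it to the seen set and the total
def pvStepA (st : PySem.Set Int × Int) (num : Int) : PySem.Set Int × Int :=
  if PySem.Set.contains st.1 num then st else (PySem.Set.add st.1 num, st.2 + num)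

def sum_unique_integers (lst : List Int) : Int :=
  (lst.foldl pvStepA (PySem.Set.empty, 0)).2

-- ===== PORT B =====
-- B's loop body over sorted(lst): state (total, prev); add x when x != prev
def pvStepB (st : Int × Option Int) (x : Int) : Int × Option Int :=
  if some x ≠ st.2 then (st.1 + x, some x) else st

def sum_unique_integers_alt (lst : List Int) : Int :=
  ((PySem.List.sorted lst (fun x => x) false).foldl pvStepB (0, none)).1

-- ===== PRECONDITION & SPEC =====
def Spec_sum_unique_integers (lst : List Int) (out : Int) : Prop := out = sum_unique_integers_alt lst
instance (lst : List Int) (out : Int) : Decidable (Spec_sum_unique_integers lst out) := by unfold Spec_sum_unique_integers; infer_instance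

-- ===== CLAIM (what is proved, stated in full; the proofs are below) =====
def Claim_equal_sum_unique_integers : Prop := ∀ (lst : List Int), Dom_sum_unique_integers lst → Spec_sum_unique_integers lst (sum_unique_integers lst)

-- ===== LEMMAS AND PROOFS =====
-- A's fold: the running total is the sum of the distinct elements seen so far.
lemma pvLoopA (lst : List Int) : ∀ (s : PySem.Set Int) (t : Int),
    (lst.foldl pvStepA (s, t)).2 = t + ((lst.foldl PySem.Set.add s).sum - s.sum) := by
  induction lst with
  | nil => intro s t; simp
  | cons x xs ih =>
    intro s t
    by_cases h : PySem.Set.contains s x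
    · have hx : x ∈ s := by simpa [PySem.Set.contains] using h
      simp [pvStepA, ih, PySem.Set.add, hx]
    · have hx : x ∉ s := by simpa [PySem.Set.contains] using h
      simp [pvStepA, ih, PySem.Set.add, hx]
      ring

-- the list of values B's scan actually adds, given previous value p
def pvD : List Int → Option Int → List Int
  | [], _ => []
  | x :: xs, p => if some x ≠ p then x :: pvD xs (some x) else pvD xs p

-- B's fold accumulates exactly the sum of pvD
lemma pvLoopB (l : List Int) : ∀ (p : Option Int) (t : Int),
    (l.foldl pvStepB (t, p)).1 = t + (pvD l p).sum := by
  induction l with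
  | nil => intro p t; simp [pvD]
  | cons x xs ih =>
    intro p t
    by_cases h : some x = p
    · simp [pvStepB, pvD, h, ih]
    · simp [pvStepB, pvD, h, ih]
      ring

-- lower bound carried by the scan state: prev ≤ every remaining element
def pvLB (p : Option Int) (z : Int) : Prop := ∀ v, p = some v → v ≤ z

-- on a ≤-sorted list whose elements all dominate prev, the scan keeps each
-- distinct value exactly once: pvD is Nodup with membership 'in l and ≠ prev'
lemma pvDChar (l : List Int) : ∀ (p : Option Int),
    l.Pairwise (· ≤ ·) → (∀ z ∈ l, pvLB p z) →
    (pvD l p).Nodup ∧ ∀ y, y ∈ pvD l p ↔ y ∈ l ∧ some y ≠ p := by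
  induction l with
  | nil => intro p _ _; simp [pvD]
  | cons x xs ih =>
    intro p hpw hlb
    have hx : ∀ z ∈ xs, x ≤ z := (List.pairwise_cons.mp hpw).1
    have hpw' : xs.Pairwise (· ≤ ·) := (List.pairwise_cons.mp hpw).2
    have hpx : pvLB p x := hlb x (by simp)
    by_cases h : some x = p
    · -- duplicate of prev: dropped, prev unchanged
      have ihs := ih p hpw' (fun z hz => hlb z (by simp [hz]))
      refine ⟨by simpa [pvD, h] using ihs.1, fun y => ?_⟩
      rw [pvD, if_neg (by simp [h]), ihs.2 y]
      constructor
      · rintro ⟨hy, hyp⟩; exact ⟨by simp [hy], hyp⟩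
      · rintro ⟨hy, hyp⟩
        rcases List.mem_cons.mp hy with rfl | hy'
        · exact absurd h (by simpa [eq_comm] using hyp)
        · exact ⟨hy', hyp⟩
    · -- new value: kept, prev becomes x
      have ihs := ih (some x) hpw' (fun z hz v hv => by
        cases hv; exact hx z hz)
      constructor
      · rw [pvD, if_pos (by simp [h])]
        refine List.nodup_cons.mpr ⟨fun hmem => ?_, ihs.1⟩
        have := ((ihs.2 x).mp hmem).2
        simp at this
      · intro y
        rw [pvD, if_pos (by simp [h]), List.mem_cons, ihs.2 y]
        constructor
        · rintro (rfl | ⟨hy, hyx⟩)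
          · exact ⟨by simp, by simpa [eq_comm] using h⟩
          · refine ⟨by simp [hy], ?_⟩
            have hxy : x ≤ y := hx y hy
            have hyx' : y ≠ x := by simpa using hyx
            intro hcontra
            rcases p with _ | v
            · exact (Option.some_ne_none y).elim (by simp at hcontra)
            · have hvx : v ≤ x := hpx v rfl
              have : v = y := by simpa using hcontra.symm
              omega
        · rintro ⟨hy, hyp⟩
          rcases List.mem_cons.mp hy with rfl | hy'
          · exact Or.inl rfl
          · by_cases hyx : y = x
            · exact Or.inl hyx
            · exact Or.inr ⟨hy', by simpa using hyx⟩

-- ===== VERDICT (by name: the statement is the Claim_ definition above) =====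
theorem sum_unique_integers_spec : Claim_equal_sum_unique_integers := by
  intro lst _
  unfold Spec_sum_unique_integers sum_unique_integers sum_unique_integers_alt
  rw [pvLoopA, pvLoopB]
  simp only [PySem.Set.empty, zero_add, List.sum_nil, sub_zero]
  have hA : lst.foldl PySem.Set.add [] = PySem.List.dedup lst := by
    rw [PySem.List.dedup_eq_ofList, PySem.Set.ofList_eq_foldl]
  rw [hA]
  have hchar := pvDChar (PySem.List.sorted lst (fun x => x) false) none
    (by simpa using PySem.List.sorted_pairwise lst (fun x => x))
    (by intro z _ v hv; cases hv)
  apply List.Perm.sum_eq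
  rw [List.perm_ext_iff_of_nodup (PySem.List.nodup_dedup lst) hchar.1]
  intro a
  rw [PySem.List.mem_dedup, hchar.2 a]
  simp [PySem.List.mem_sorted]
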